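-- pv_equiv track=rewrite | github.com/thedanielbatinicproject/ADAS | scripts/dataset/play_index_video.py | _hit_button
-- ===== SOURCE A (Python) =====
-- from typing import Any, Dict, List, Optional, Tuple
--
-- _CTRL_H = 56          # height of the button strip below the video
--
-- _BTN_W = 76           # width of each button
--
-- _BTN_PAD_Y = 8        # top/bottom padding inside the strip
--
-- _BTN_ACTIONS = [("<<", "first"), ("<", "prev"), ("||", "pause"), (">", "next"), (">>", "last")]
--
-- def _hit_button(click_x: int, click_y: int, frame_h: int, frame_w: int) -> Optional[str]:
--     """Return action name if (click_x, click_y) lands on a button in the control strip."""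
--     cy = click_y - frame_h
--     if cy < _BTN_PAD_Y or cy > _CTRL_H - _BTN_PAD_Y:
--         return None
--     n = len(_BTN_ACTIONS)
--     spacing = max((frame_w - n * _BTN_W) // (n + 1), 6)
--     for i, (_, action) in enumerate(_BTN_ACTIONS):
--         bx = spacing + i * (_BTN_W + spacing)
--         if bx <= click_x <= bx + _BTN_W:
--             return action
--     return None
-- ===== SOURCE B (Python) =====
-- from typing import Optional
--
-- _CTRL_H = 56
-- _BTN_W = 76
-- _BTN_PAD_Y = 8
-- _BTN_ACTIONS = [("<<", "first"), ("<", "prev"), ("||", "pause"), (">", "next"), (">>", "last")]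
--
--
-- def _hit_button(click_x: int, click_y: int, frame_h: int, frame_w: int) -> Optional[str]:
--     """Return action name if (click_x, click_y) lands on a button in the control strip."""
--     cy = click_y - frame_h
--     if cy < _BTN_PAD_Y or cy > _CTRL_H - _BTN_PAD_Y:
--         return None
--     n = len(_BTN_ACTIONS)
--     spacing = max((frame_w - n * _BTN_W) // (n + 1), 6)
--     period = _BTN_W + spacing
--     offset = click_x - spacing
--     if offset < 0:
--         return None
--     i = offset // period
--     if i < n and offset % period <= _BTN_W:
--         return _BTN_ACTIONS[i][1]
--     return None
-- ===== Notes on version B (the rewrite author's own statement) =====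
-- stated objective: simpler
-- what changed: The scan over all five buttons is replaced by direct arithmetic: the clicked index is computed in one step as offset // period with an offset % period <= _BTN_W in-button test, instead of looping over _BTN_ACTIONS and testing each button's interval.
import Mathlib
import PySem

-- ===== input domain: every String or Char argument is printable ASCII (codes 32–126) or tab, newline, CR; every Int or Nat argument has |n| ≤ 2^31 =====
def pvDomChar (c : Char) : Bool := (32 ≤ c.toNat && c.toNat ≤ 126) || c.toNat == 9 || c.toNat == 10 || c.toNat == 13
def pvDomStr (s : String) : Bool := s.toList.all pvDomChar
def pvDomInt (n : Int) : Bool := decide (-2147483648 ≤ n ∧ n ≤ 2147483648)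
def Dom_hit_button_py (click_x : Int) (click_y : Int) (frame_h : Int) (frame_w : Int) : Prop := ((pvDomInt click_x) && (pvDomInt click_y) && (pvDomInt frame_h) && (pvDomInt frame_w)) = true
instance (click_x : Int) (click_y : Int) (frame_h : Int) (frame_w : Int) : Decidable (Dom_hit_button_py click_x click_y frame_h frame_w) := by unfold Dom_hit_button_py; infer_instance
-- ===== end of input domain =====

-- B replaces A's scan over the five buttons by one floor-division computing the
-- clicked index directly (objective: simpler, O(1) in the button count).

-- ===== PORT A =====
def btnActions : List (String × String) :=
  [("<<", "first"), ("<", "prev"), ("||", "pause"), (">", "next"), (">>", "last")]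

-- the 'for i, (_, action) in enumerate(_BTN_ACTIONS)' loop, i carried explicitly
def hitLoop (click_x : Int) (spacing : Int) (i : Int) : List (String × String) → Option String
  | [] => none
  | (_, action) :: rest =>
      let bx := spacing + i * (76 + spacing)
      if bx ≤ click_x ∧ click_x ≤ bx + 76 then some action
      else hitLoop click_x spacing (i + 1) rest

def hit_button_py (click_x : Int) (click_y : Int) (frame_h : Int) (frame_w : Int) : Option String :=
  let cy := click_y - frame_h
  if cy < 8 ∨ cy > 56 - 8 then none
  else
    let n : Int := (btnActions.length : Int)
    let spacing := max (PySem.Int.floordiv (frame_w - n * 76) (n + 1)) 6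
    hitLoop click_x spacing 0 btnActions

-- ===== PORT B =====
def hit_button_py_alt (click_x : Int) (click_y : Int) (frame_h : Int) (frame_w : Int) : Option String :=
  let cy := click_y - frame_h
  if cy < 8 ∨ cy > 56 - 8 then none
  else
    let n : Int := (btnActions.length : Int)
    let spacing := max (PySem.Int.floordiv (frame_w - n * 76) (n + 1)) 6
    let period := 76 + spacing
    let offset := click_x - spacing
    if offset < 0 then none
    else
      let i := PySem.Int.floordiv offset period
      if i < n ∧ PySem.Int.mod offset period ≤ 76 then
        -- _BTN_ACTIONS[i][1]; index is in range whenever this branch is taken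
        match PySem.List.pyGet? btnActions i with
        | some pr => some pr.2
        | none => none
      else none

-- ===== PRECONDITION & SPEC =====
def Spec_hit_button_py (click_x : Int) (click_y : Int) (frame_h : Int) (frame_w : Int) (out : Option String) : Prop := out = hit_button_py_alt click_x click_y frame_h frame_w
instance (click_x : Int) (click_y : Int) (frame_h : Int) (frame_w : Int) (out : Option String) : Decidable (Spec_hit_button_py click_x click_y frame_h frame_w out) := by unfold Spec_hit_button_py; infer_instance

-- ===== CLAIM (what is proved, stated in full; the proofs are below) =====
def Claim_equal_hit_button_py : Prop := ∀ (click_x : Int) (click_y : Int) (frame_h : Int) (frame_w : Int), Dom_hit_button_py click_x click_y frame_h frame_w → Spec_hit_button_py click_x click_y frame_h frame_w (hit_button_py click_x click_y frame_h frame_w)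

-- ===== LEMMAS AND PROOFS =====

-- core equivalence after the cy guard, with the (common) spacing abstracted
theorem pv_core (x s : Int) (hs : 6 <= s) :
    hitLoop x s 0 btnActions =
      (if x - s < 0 then none
       else if PySem.Int.floordiv (x - s) (76 + s) < ((btnActions.length : Nat) : Int) ∧
               PySem.Int.mod (x - s) (76 + s) <= 76 then
         match PySem.List.pyGet? btnActions (PySem.Int.floordiv (x - s) (76 + s)) with
         | some pr => some pr.2
         | none => none
       else none) := by
  have hlen : ((btnActions.length : Nat) : Int) = 5 := by norm_num [btnActions]
  rw [hlen]
  obtain ⟨q, r, hqr, hr0, hrlt, hfd, hmd⟩ :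
      ∃ q r, x - s = (76 + s) * q + r ∧ 0 <= r ∧ r < 76 + s ∧
        PySem.Int.floordiv (x - s) (76 + s) = q ∧ PySem.Int.mod (x - s) (76 + s) = r := by
    refine ⟨_, _, ?_, PySem.Int.mod_nonneg _ (by omega), PySem.Int.mod_lt _ (by omega), rfl, rfl⟩
    have := PySem.Int.floordiv_mul_add_mod (x - s) (76 + s)
    linarith
  rw [hfd, hmd]
  simp only [btnActions, hitLoop]
  by_cases h0 : x - s < 0
  · -- left of the first button: every loop test fails, B's offset-guard fires
    rw [if_neg (by omega), if_neg (by omega), if_neg (by omega), if_neg (by omega),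
        if_neg (by omega), if_pos h0]
  · have hq0 : 0 <= q := by
      rcases lt_or_ge q 0 with h | h
      · exfalso
        have : (76 + s) * q <= (76 + s) * (-1) :=
          mul_le_mul_of_nonneg_left (by omega) (by omega)
        omega
      · exact h
    by_cases h5 : 5 <= q
    · -- q >= 5: the click is right of the last button; both sides return none
      have hb : (76 + s) * 5 <= (76 + s) * q :=
        mul_le_mul_of_nonneg_left h5 (by omega)
      split_ifs <;> first | rfl | omega
    · -- 0 <= q <= 4: exactly loop branch q can fire, iff r <= 76
      interval_cases q <;> split_ifs <;> first | rfl | omega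

-- ===== VERDICT (by name: the statement is the Claim_ definition above) =====
theorem hit_button_py_spec : Claim_equal_hit_button_py := by
  intro click_x click_y frame_h frame_w _
  simp only [Spec_hit_button_py, hit_button_py, hit_button_py_alt]
  by_cases hcy : click_y - frame_h < 8 ∨ click_y - frame_h > 56 - 8
  · rw [if_pos hcy, if_pos hcy]
  · rw [if_neg hcy, if_neg hcy]
    exact pv_core click_x _ (le_max_right _ _)
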